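-- pv_equiv track=rewrite | github.com/codemeleon/BitterBits | src/aa2codon.py | amino2codon
-- ===== SOURCE A (Python) =====
-- def amino2codon(aa, nuc):
--     """Convert to Codon."""
--     codon = ''
--     n = 0
--     for a in aa:
--         if a == '-':
--             codon += '---'
--         else:
--             codon += nuc[3*n: 3*(n+1)]
--             n += 1
--     return codon
-- ===== SOURCE B (Python) =====
-- def amino2codon(aa, nuc):
--     """Convert to Codon."""
--     parts = aa.split('-')
--     pieces = []
--     pos = 0
--     for seg in parts:
--         end = pos + 3 * len(seg)
--         pieces.append(nuc[pos:end])
--         pos = end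
--     return '---'.join(pieces)
-- ===== Notes on version B (the rewrite author's own statement) =====
-- stated objective: faster
-- what changed: Replaces A's per-character loop with its running codon counter by a run-based algorithm: split aa on '-', emit one contiguous nuc slice of 3*len(run) chars per run, and rejoin the blocks with '---'.
import Mathlib
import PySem

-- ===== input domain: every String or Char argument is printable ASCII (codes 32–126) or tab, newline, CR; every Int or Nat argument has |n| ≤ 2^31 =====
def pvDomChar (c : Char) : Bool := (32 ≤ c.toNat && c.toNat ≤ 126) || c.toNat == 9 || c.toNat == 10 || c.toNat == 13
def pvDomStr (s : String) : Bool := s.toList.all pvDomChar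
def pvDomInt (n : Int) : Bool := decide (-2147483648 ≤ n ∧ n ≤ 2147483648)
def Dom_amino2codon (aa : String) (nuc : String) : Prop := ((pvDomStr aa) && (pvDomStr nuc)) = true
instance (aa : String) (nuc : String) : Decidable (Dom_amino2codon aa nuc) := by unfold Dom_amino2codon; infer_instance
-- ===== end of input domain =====

-- B replaces A's per-character loop with its running codon counter by a run-based
-- algorithm: split aa on '-', take one contiguous nuc slice of 3*len(run) per run,
-- and rejoin the runs' codon blocks with '---' (alternative decomposition).

-- ===== PORT A =====
def amino2codon (aa : String) (nuc : String) : String :=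
  (aa.toList.foldl
    (fun (st : String × Int) a =>
      if a = '-' then (st.1 ++ "---", st.2)
      else (st.1 ++ PySem.Str.slice nuc (some (3 * st.2)) (some (3 * (st.2 + 1))), st.2 + 1))
    ("", 0)).1

-- ===== PORT B =====
def amino2codon_alt (aa : String) (nuc : String) : String :=
  -- parts = aa.split('-')
  let parts : List (List Char) := PySem.Chars.splitOn aa.toList ['-']
  -- for seg in parts: pieces.append(nuc[pos:pos+3*len(seg)]); pos advances
  let r := parts.foldl
    (fun (st : List String × Int) seg =>
      let e := st.2 + 3 * (seg.length : Int)
      (st.1 ++ [PySem.Str.slice nuc (some st.2) (some e)], e))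
    ([], 0)
  -- '---'.join(pieces)
  PySem.Str.join "---" r.1

-- ===== PRECONDITION & SPEC =====
def Spec_amino2codon (aa : String) (nuc : String) (out : String) : Prop := out = amino2codon_alt aa nuc
instance (aa : String) (nuc : String) (out : String) : Decidable (Spec_amino2codon aa nuc out) := by unfold Spec_amino2codon; infer_instance

-- ===== CLAIM (what is proved, stated in full; the proofs are below) =====
def Claim_equal_amino2codon : Prop := ∀ (aa : String) (nuc : String), Dom_amino2codon aa nuc → Spec_amino2codon aa nuc (amino2codon aa nuc)

-- ===== LEMMAS AND PROOFS =====

-- pure recursion computing aa.split('-') (single-char separator)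
def pvSpl : List Char → List (List Char)
  | [] => [[]]
  | c :: t =>
    if c = '-' then [] :: pvSpl t
    else
      match pvSpl t with
      | [] => [[c]]
      | h :: r => (c :: h) :: r

lemma pvSpl_ne_nil (l : List Char) : pvSpl l ≠ [] := by
  cases l with
  | nil => simp [pvSpl]
  | cons c t =>
    simp only [pvSpl]
    split
    · simp
    · cases h : pvSpl t <;> simp

lemma pvGo_eq : ∀ (fuel : Nat) (l cur : List Char) (acc : List (List Char)),
    l.length < fuel →
    PySem.Chars.splitOn.go ['-'] fuel l cur acc
      = acc.reverse ++ (pvSpl l).modifyHead (cur.reverse ++ ·) := by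
  intro fuel
  induction fuel with
  | zero => intro l cur acc h; omega
  | succ fuel ih =>
    intro l cur acc h
    cases l with
    | nil => simp [PySem.Chars.splitOn.go, pvSpl]
    | cons c t =>
      by_cases hc : c = '-'
      · subst hc
        rw [show PySem.Chars.splitOn.go ['-'] (fuel+1) ('-' :: t) cur acc
              = PySem.Chars.splitOn.go ['-'] fuel t [] (cur.reverse :: acc) by
            simp [PySem.Chars.splitOn.go, List.isPrefixOf]]
        rw [ih t [] (cur.reverse :: acc) (by simpa using Nat.lt_of_succ_lt_succ h)]
        simp [pvSpl]
        cases pvSpl t <;> rfl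
      · rw [show PySem.Chars.splitOn.go ['-'] (fuel+1) (c :: t) cur acc
              = PySem.Chars.splitOn.go ['-'] fuel t (c :: cur) acc by
            simp only [PySem.Chars.splitOn.go, List.isPrefixOf]
            simp
            intro h
            exact absurd h.symm hc]
        rw [ih t (c :: cur) acc (by simpa using Nat.lt_of_succ_lt_succ h)]
        simp only [pvSpl, if_neg hc]
        cases hsp : pvSpl t with
        | nil => exact absurd hsp (pvSpl_ne_nil t)
        | cons hh rr => simp

lemma pvSplitOn_eq (l : List Char) : PySem.Chars.splitOn l ['-'] = pvSpl l := by
  unfold PySem.Chars.splitOn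
  rw [pvGo_eq (l.length + 1) l [] [] (by omega)]
  cases hsp : pvSpl l with
  | nil => exact absurd hsp (pvSpl_ne_nil l)
  | cons h r => simp

-- a contiguous slice with Nat bounds
def pvSliceN (nuc : List Char) (a b : Nat) : List Char :=
  PySem.List.slice nuc (some (a : Int)) (some (b : Int))

lemma pvSliceN_cat (nuc : List Char) (a b c : Nat) (h1 : a ≤ b) (h2 : b ≤ c) :
    pvSliceN nuc a b ++ pvSliceN nuc b c = pvSliceN nuc a c := by
  unfold pvSliceN
  rw [PySem.List.slice_natCast, PySem.List.slice_natCast, PySem.List.slice_natCast]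
  have hd : nuc.drop b = (nuc.drop a).drop (b - a) := by
    rw [List.drop_drop]; congr 1; omega
  rw [hd, ← List.take_add]
  congr 1
  omega

lemma pvSliceN_self (nuc : List Char) (a : Nat) : pvSliceN nuc a a = [] := by
  unfold pvSliceN
  rw [PySem.List.slice_natCast]
  simp

-- characterization of A's loop output (codon string from position k onward)
def pvA (nuc : List Char) : List Char → Nat → List Char
  | [], _ => []
  | c :: t, k =>
    if c = '-' then '-' :: '-' :: '-' :: pvA nuc t k
    else pvSliceN nuc (3 * k) (3 * k + 3) ++ pvA nuc t (k + 1)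

-- characterization of B's loop output (one slice per segment, positions chained)
def pvSeg (nuc : List Char) : List (List Char) → Nat → List (List Char)
  | [], _ => []
  | s :: r, p => pvSliceN nuc p (p + 3 * s.length) :: pvSeg nuc r (p + 3 * s.length)

lemma pvA_fold (nuc : String) : ∀ (l : List Char) (acc : String) (k : Nat),
    ((l.foldl
      (fun (st : String × Int) a =>
        if a = '-' then (st.1 ++ "---", st.2)
        else (st.1 ++ PySem.Str.slice nuc (some (3 * st.2)) (some (3 * (st.2 + 1))), st.2 + 1))
      (acc, (k : Int))).1).toList = acc.toList ++ pvA nuc.toList l k := by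
  intro l
  induction l with
  | nil => intro acc k; simp [pvA]
  | cons c t ih =>
    intro acc k
    by_cases hc : c = '-'
    · subst hc
      rw [List.foldl_cons, if_pos rfl]
      dsimp only
      rw [ih (acc ++ "---") k,
          show pvA nuc.toList ('-' :: t) k = '-' :: '-' :: '-' :: pvA nuc.toList t k from by
            simp [pvA],
          String.toList_append, List.append_assoc]
      rfl
    · rw [List.foldl_cons, if_neg hc]
      dsimp only
      rw [show ((k : Int) + 1) = ((k + 1 : Nat) : Int) by push_cast; ring]
      rw [ih _ (k + 1)]
      simp only [pvA, if_neg hc, String.toList_append, PySem.Str.toList_slice,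
        PySem.Chars.slice_eq_listSlice, List.append_assoc]
      congr 2

lemma pvB_fold (nuc : String) : ∀ (parts : List (List Char)) (ps : List String) (p : Nat),
    ((parts.foldl
      (fun (st : List String × Int) seg =>
        let e := st.2 + 3 * (seg.length : Int)
        (st.1 ++ [PySem.Str.slice nuc (some st.2) (some e)], e))
      (ps, (p : Int))).1).map String.toList
      = ps.map String.toList ++ pvSeg nuc.toList parts p := by
  intro parts
  induction parts with
  | nil => intro ps p; simp [pvSeg]
  | cons s r ih =>
    intro ps p
    rw [List.foldl_cons]
    dsimp only
    rw [show (p : Int) + 3 * (s.length : Int) = ((p + 3 * s.length : Nat) : Int) by push_cast; ring]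
    rw [ih _ (p + 3 * s.length)]
    simp only [pvSeg, List.map_append, List.map_cons, List.map_nil, List.append_assoc]
    congr 2
    rw [PySem.Str.toList_slice, PySem.Chars.slice_eq_listSlice]
    unfold pvSliceN
    exact List.singleton_append

-- key: joining B's per-run slices reproduces A's per-character codon string
lemma pvKey (nuc : List Char) : ∀ (l : List Char) (k : Nat),
    PySem.Chars.join ['-', '-', '-'] (pvSeg nuc (pvSpl l) (3 * k)) = pvA nuc l k := by
  intro l
  induction l with
  | nil =>
    intro k
    simp [pvSpl, pvSeg, pvA, PySem.Chars.join_singleton, pvSliceN_self]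
  | cons c t ih =>
    intro k
    by_cases hc : c = '-'
    · subst hc
      rw [show pvSpl ('-' :: t) = [] :: pvSpl t from by simp [pvSpl]]
      rw [show pvA nuc ('-' :: t) k = '-' :: '-' :: '-' :: pvA nuc t k from by simp [pvA]]
      cases hsp : pvSpl t with
      | nil => exact absurd hsp (pvSpl_ne_nil t)
      | cons hh rr =>
        have hik := ih k
        rw [hsp] at hik
        simp only [pvSeg, List.length_nil, Nat.mul_zero, Nat.add_zero, pvSliceN_self] at hik ⊢
        rw [PySem.Chars.join_cons_cons, hik]
        simp
    · cases hsp : pvSpl t with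
      | nil => exact absurd hsp (pvSpl_ne_nil t)
      | cons hh rr =>
        rw [show pvSpl (c :: t) = (c :: hh) :: rr from by simp [pvSpl, if_neg hc, hsp]]
        rw [show pvA nuc (c :: t) k
              = pvSliceN nuc (3 * k) (3 * k + 3) ++ pvA nuc t (k + 1) from by simp [pvA, hc]]
        have hih := ih (k + 1)
        rw [hsp] at hih
        simp only [pvSeg, List.length_cons] at hih ⊢
        rw [← hih]
        have hsplit : pvSliceN nuc (3 * k) (3 * k + 3 * (hh.length + 1))
            = pvSliceN nuc (3 * k) (3 * k + 3) ++ pvSliceN nuc (3 * k + 3) (3 * k + 3 * (hh.length + 1)) := by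
          rw [pvSliceN_cat nuc (3 * k) (3 * k + 3) (3 * k + 3 * (hh.length + 1)) (by omega) (by omega)]
        rw [hsplit]
        have hpos : 3 * k + 3 * (hh.length + 1) = 3 * (k + 1) + 3 * hh.length := by omega
        have hpos2 : 3 * k + 3 = 3 * (k + 1) := by omega
        rw [hpos, hpos2]
        cases pvSeg nuc rr (3 * (k + 1) + 3 * hh.length) with
        | nil =>
          rw [PySem.Chars.join_singleton, PySem.Chars.join_singleton]
        | cons q qs =>
          rw [PySem.Chars.join_cons_cons, PySem.Chars.join_cons_cons]
          simp [List.append_assoc]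

-- ===== VERDICT (by name: the statement is the Claim_ definition above) =====
theorem amino2codon_spec : Claim_equal_amino2codon := by
  intro aa nuc _
  unfold Spec_amino2codon amino2codon amino2codon_alt
  apply String.toList_inj.mp
  rw [show (0 : Int) = ((0 : Nat) : Int) by rfl]
  rw [pvA_fold nuc aa.toList "" 0]
  rw [PySem.Str.toList_join, pvSplitOn_eq, pvB_fold nuc (pvSpl aa.toList) [] 0]
  have h := pvKey nuc.toList aa.toList 0
  rw [Nat.mul_zero] at h
  simp only [List.map_nil, List.nil_append]
  rw [show ("---".toList : List Char) = ['-', '-', '-'] from rfl, h]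
  rfl
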